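-- pv_equiv track=rewrite | github.com/tat-tik/Test_homework | main.py | unigue_names
-- ===== SOURCE A (Python) =====
-- def unigue_names(mentors):
--     all_list = []
--     for person in mentors:
--         all_list.extend(person)
--     all_names_list = []
--     for mentor in all_list:
--         name = mentor.split()[0]
--         all_names_list.append(name)
--     unique_names = set(all_names_list)
--     all_names_sorted = sorted(unique_names)
--     return f'Уникальные имена преподавателей: {", ".join(all_names_sorted)}'
-- ===== SOURCE B (Python) =====
-- def unigue_names(mentors):
--     all_names = [m.split()[0] for person in mentors for m in person]
--     all_names.sort()
--     out = []
--     prev = None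
--     for n in all_names:
--         if n != prev:
--             out.append(n)
--             prev = n
--     return 'Уникальные имена преподавателей: ' + ', '.join(out)
-- ===== Notes on version B (the rewrite author's own statement) =====
-- stated objective: alternative
-- what changed: Replaces set-based deduplication (set() then sorted()) with sorting the full first-name list including duplicates and removing duplicates in one adjacency pass over the sorted list, tracking only the previously emitted name.
import Mathlib
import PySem

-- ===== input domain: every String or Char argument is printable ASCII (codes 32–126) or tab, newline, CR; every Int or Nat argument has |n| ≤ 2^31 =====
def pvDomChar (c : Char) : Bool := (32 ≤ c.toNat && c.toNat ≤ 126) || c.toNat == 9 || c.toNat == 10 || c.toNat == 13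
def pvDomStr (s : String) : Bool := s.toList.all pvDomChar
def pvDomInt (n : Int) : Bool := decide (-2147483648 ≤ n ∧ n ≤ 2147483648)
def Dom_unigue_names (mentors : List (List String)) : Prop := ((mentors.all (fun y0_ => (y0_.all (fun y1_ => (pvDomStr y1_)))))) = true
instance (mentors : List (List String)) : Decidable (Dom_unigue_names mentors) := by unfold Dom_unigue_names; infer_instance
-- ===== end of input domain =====

-- B replaces A's hash-set deduplication with a sort of the full duplicate-carrying
-- name list followed by a single adjacency pass that drops repeated neighbours
-- (alternative decomposition, same asymptotic cost).

-- ===== PORT A =====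
def unigue_names (mentors : List (List String)) : String :=
  let all_list := mentors.foldl (fun acc person => acc ++ person) []
  let all_names_list :=
    all_list.foldl (fun acc mentor => acc ++ [PySem.List.pyGetD (PySem.Str.split₀ mentor) 0 ""]) []
  let unique_names := PySem.Set.ofList all_names_list
  let all_names_sorted := PySem.List.sorted unique_names (fun x => x) false
  "Уникальные имена преподавателей: " ++ PySem.Str.join ", " all_names_sorted

-- ===== PORT B =====
def unigue_names_alt (mentors : List (List String)) : String :=
  let all_names :=
    mentors.flatMap (fun person => person.map (fun m => PySem.List.pyGetD (PySem.Str.split₀ m) 0 ""))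
  let sortedNames := PySem.List.sorted all_names (fun x => x) false
  let st := sortedNames.foldl
    (fun (st : Option String × List String) n =>
      if some n ≠ st.1 then (some n, st.2 ++ [n]) else st) (none, [])
  "Уникальные имена преподавателей: " ++ PySem.Str.join ", " st.2

-- ===== PRECONDITION & SPEC =====
-- Pre_ excludes exactly the inputs where A raises IndexError: a mentor string
-- containing no word at all, whose split() yields no token so split()[0] fails.
def Pre_unigue_names (mentors : List (List String)) : Prop :=
  ∀ person ∈ mentors, ∀ m ∈ person, PySem.Str.split₀ m ≠ []
instance (mentors : List (List String)) : Decidable (Pre_unigue_names mentors) := by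
  unfold Pre_unigue_names; infer_instance
def pvWitness_unigue_names : List (List String) := [["Ivan Petrov", "Anna K"], ["Ivan X"]]

def Spec_unigue_names (mentors : List (List String)) (out : String) : Prop := out = unigue_names_alt mentors
instance (mentors : List (List String)) (out : String) : Decidable (Spec_unigue_names mentors out) := by unfold Spec_unigue_names; infer_instance

-- ===== CLAIM (what is proved, stated in full; the proofs are below) =====
def Claim_equal_unigue_names : Prop := ∀ (mentors : List (List String)), Dom_unigue_names mentors → Pre_unigue_names mentors → Spec_unigue_names mentors (unigue_names mentors)

-- ===== LEMMAS AND PROOFS =====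

-- recursive description of B's adjacency-dedup loop
def pvDedup : Option String → List String → List String
  | _, [] => []
  | p, n :: t => if some n = p then pvDedup p t else n :: pvDedup (some n) t

theorem pvFoldl_dedup (l : List String) : ∀ (p : Option String) (acc : List String),
    (l.foldl (fun (st : Option String × List String) n =>
      if some n ≠ st.1 then (some n, st.2 ++ [n]) else st) (p, acc)).2 = acc ++ pvDedup p l := by
  induction l with
  | nil => intro p acc; simp [pvDedup]
  | cons n t ih =>
    intro p acc
    simp only [List.foldl_cons]
    by_cases h : some n = p
    · rw [if_neg (by simp [h]), ih p acc]
      simp [pvDedup, h]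
    · rw [if_pos (by simp [h]), ih (some n) (acc ++ [n])]
      simp [pvDedup, h]

theorem pvMem_dedup (l : List String) : ∀ (p : Option String),
    l.Pairwise (· ≤ ·) → (∀ y ∈ l, ∀ v, p = some v → v ≤ y) →
    ∀ x, x ∈ pvDedup p l ↔ (x ∈ l ∧ p ≠ some x) := by
  induction l with
  | nil => intro p _ _ x; simp [pvDedup]
  | cons n t ih =>
    intro p hp hle x
    have hp' : t.Pairwise (· ≤ ·) := hp.tail
    have hn : ∀ y ∈ t, n ≤ y := fun y hy => (List.pairwise_cons.mp hp).1 y hy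
    by_cases h : some n = p
    · have iht := ih p hp' (fun y hy v hv => hle y (List.mem_cons_of_mem n hy) v hv) x
      simp only [pvDedup, if_pos h, iht]
      constructor
      · rintro ⟨hxt, hpx⟩; exact ⟨List.mem_cons_of_mem n hxt, hpx⟩
      · rintro ⟨hxl, hpx⟩
        rcases List.mem_cons.mp hxl with rfl | hxt
        · exact absurd h.symm hpx
        · exact ⟨hxt, hpx⟩
    · have iht := ih (some n) hp' (fun y hy v hv => by
        cases Option.some.inj hv; exact hn y hy) x
      simp only [pvDedup, if_neg h, List.mem_cons, iht]
      constructor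
      · rintro (rfl | ⟨hxt, hnx⟩)
        · exact ⟨Or.inl rfl, fun hc => h hc.symm⟩
        · refine ⟨Or.inr hxt, fun hc => ?_⟩
          rcases p with _ | v
          · simp at hc
          · have hv : v = x := Option.some.inj hc
            have h1 : v ≤ n := hle n List.mem_cons_self v rfl
            have h2 : n ≤ x := hn x hxt
            have hxn : x = n := le_antisymm (hv ▸ h1) h2
            exact hnx (congrArg some hxn.symm)
      · rintro ⟨hxl, hpx⟩
        rcases hxl with rfl | hxt
        · exact Or.inl rfl
        · by_cases hx : x = n
          · exact Or.inl hx
          · exact Or.inr ⟨hxt, fun hc => hx (Option.some.inj hc).symm⟩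

theorem pvChain_dedup (l : List String) : ∀ (p : Option String),
    l.Pairwise (· ≤ ·) → (∀ y ∈ l, ∀ v, p = some v → v ≤ y) →
    (pvDedup p l).Pairwise (· < ·) ∧ (∀ x ∈ pvDedup p l, ∀ v, p = some v → v < x) := by
  induction l with
  | nil => intro p _ _; simp [pvDedup]
  | cons n t ih =>
    intro p hp hle
    have hp' : t.Pairwise (· ≤ ·) := hp.tail
    have hn : ∀ y ∈ t, n ≤ y := fun y hy => (List.pairwise_cons.mp hp).1 y hy
    by_cases h : some n = p
    · simpa [pvDedup, if_pos h] using
        ih p hp' (fun y hy v hv => hle y (List.mem_cons_of_mem n hy) v hv)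
    · obtain ⟨ihpair, ihgt⟩ := ih (some n) hp' (fun y hy v hv => by
        cases Option.some.inj hv; exact hn y hy)
      constructor
      · simp only [pvDedup, if_neg h, List.pairwise_cons]
        exact ⟨fun x hx => ihgt x hx n rfl, ihpair⟩
      · intro x hx v hv
        have hvn : v < n := by
          have h1 : v ≤ n := hle n (List.mem_cons_self) v hv
          rcases lt_or_eq_of_le h1 with hlt | rfl
          · exact hlt
          · exact absurd hv.symm h
        simp only [pvDedup, if_neg h, List.mem_cons] at hx
        rcases hx with rfl | hx
        · exact hvn
        · exact lt_trans hvn (ihgt x hx n rfl)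

theorem pvFoldl_flatten (l : List (List String)) : ∀ acc,
    l.foldl (fun acc person => acc ++ person) acc = acc ++ l.flatten := by
  induction l with
  | nil => intro acc; simp
  | cons p t ih => intro acc; simp [ih]

theorem pvFoldl_map (f : String → String) (l : List String) : ∀ acc,
    l.foldl (fun acc m => acc ++ [f m]) acc = acc ++ l.map f := by
  induction l with
  | nil => intro acc; simp
  | cons m t ih => intro acc; simp [ih]

theorem pvFlatMap_map (f : String → String) (l : List (List String)) :
    l.flatMap (fun person => person.map f) = l.flatten.map f := by
  induction l with
  | nil => rfl
  | cons a t ih => simp only [List.flatMap_cons, List.flatten_cons, List.map_append, ih]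

-- the heart: sorted(set(N)) equals the adjacency-dedup of sorted(N)
theorem pvSorted_set_eq_dedup (N : List String) :
    PySem.List.sorted (PySem.Set.ofList N) (fun x => x) false =
      pvDedup none (PySem.List.sorted N (fun x => x) false) := by
  set s := PySem.List.sorted N (fun x => x) false with hs
  have hpair : s.Pairwise (· ≤ ·) := by
    simpa using PySem.List.sorted_pairwise (xs := N) (key := fun x => x)
  have hmem := pvMem_dedup s none hpair (by simp)
  have hchain := (pvChain_dedup s none hpair (by simp)).1
  apply PySem.List.sorted_eq_of_perm_of_pairwise_lt
  · refine (List.perm_ext_iff_of_nodup (hchain.imp fun h => ne_of_lt h)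
      (PySem.Set.nodup_ofList N)).mpr fun x => ?_
    rw [hmem x]
    have hx1 : x ∈ s ↔ x ∈ N := by
      rw [hs]; exact PySem.List.mem_sorted (xs := N) (key := fun x : String => x) (rev := false) x
    simp [hx1, PySem.Set.mem_ofList]
  · simpa using hchain

-- ===== VERDICT (by name: the statement is the Claim_ definition above) =====
theorem unigue_names_spec : Claim_equal_unigue_names := by
  intro mentors _ _
  unfold Spec_unigue_names unigue_names unigue_names_alt
  simp only [pvFoldl_flatten, pvFoldl_map, List.nil_append, pvFoldl_dedup]
  rw [pvFlatMap_map, pvSorted_set_eq_dedup]
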